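-- pv_equiv track=rewrite | github.com/aditya-kd/toolbox | work_aditya/bt_lca.py | solve
-- ===== SOURCE A (Python) =====
-- def solve(ss):
--     ls= list(ss)
--     count=0
--     for i in range(0, len(ss)-2):
--         if ls[i]==ls[i+1] and ls[i+1]!=ls[i+2]:
--             ls[i+2]= ls[i]
--             count+=1
--     return count
-- ===== SOURCE B (Python) =====
-- def solve(ss):
--     ls = list(ss)
--     n = len(ls)
--     for p in range(n - 1):
--         if ls[p] == ls[p + 1]:
--             return sum(1 for c in ls[p + 2:] if c != ls[p])
--     return 0
-- ===== Notes on version B (the rewrite author's own statement) =====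
-- stated objective: simpler
-- what changed: Replaced the stateful in-place cascade (mutating ls[i+2] while scanning all windows) by a direct computation: find the first adjacent equal pair, then count the characters after it that differ from its value.
import Mathlib
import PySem

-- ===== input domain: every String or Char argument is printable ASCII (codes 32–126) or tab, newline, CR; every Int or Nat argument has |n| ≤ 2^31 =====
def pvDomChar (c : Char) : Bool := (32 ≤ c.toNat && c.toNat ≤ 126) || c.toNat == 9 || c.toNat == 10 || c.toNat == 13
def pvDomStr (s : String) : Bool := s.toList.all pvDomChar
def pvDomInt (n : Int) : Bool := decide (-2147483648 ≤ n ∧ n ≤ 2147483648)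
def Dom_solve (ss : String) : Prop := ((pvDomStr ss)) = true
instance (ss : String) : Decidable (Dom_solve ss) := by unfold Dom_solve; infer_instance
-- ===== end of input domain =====

-- B replaces A's stateful in-place cascade by find-first-adjacent-equal-pair then
-- count-mismatches-in-suffix (objective: simpler; same value on every input).

-- ===== PORT A =====
-- list indexing: all indices the loop uses are in range, so the default is never read
def pvIdx (ls : List Char) (i : Nat) : Char := ls.getD i 'a'

def solveStep (s : List Char × Int) (i : Nat) : List Char × Int :=
  if pvIdx s.1 i == pvIdx s.1 (i+1) && !(pvIdx s.1 (i+1) == pvIdx s.1 (i+2)) then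
    (s.1.set (i+2) (pvIdx s.1 i), s.2 + 1)
  else s

def solve (ss : String) : Int :=
  ((List.range (ss.toList.length - 2)).foldl solveStep (ss.toList, 0)).2

-- ===== PORT B =====
-- find the first adjacent equal pair; return the pair's char and the rest after it
def pvFindPair : List Char → Option (Char × List Char)
  | a :: b :: t => if a == b then some (a, t) else pvFindPair (b :: t)
  | _ => none

def solve_alt (ss : String) : Int :=
  match pvFindPair ss.toList with
  | some (v, rest) => ((rest.filter (fun c => c != v)).length : Int)
  | none => 0

-- ===== PRECONDITION & SPEC =====
def Spec_solve (ss : String) (out : Int) : Prop := out = solve_alt ss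
instance (ss : String) (out : Int) : Decidable (Spec_solve ss out) := by unfold Spec_solve; infer_instance

-- ===== CLAIM (what is proved, stated in full; the proofs are below) =====
def Claim_equal_solve : Prop := ∀ (ss : String), Dom_solve ss → Spec_solve ss (solve ss)

-- ===== LEMMAS AND PROOFS =====

-- the loop does nothing while no adjacent equal pair has been seen
theorem foldl_no_pair (m : Nat) (ls : List Char) (c : Int)
    (h : ∀ i, i < m → pvIdx ls i ≠ pvIdx ls (i+1)) :
    (List.range m).foldl solveStep (ls, c) = (ls, c) := by
  induction m with
  | zero => simp
  | succ m ih =>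
      rw [List.range_succ, List.foldl_append, ih (fun i hi => h i (by omega))]
      simp only [List.foldl_cons, List.foldl_nil, solveStep]
      have := h m (by omega)
      simp [this]

-- once positions p and p+1 both hold v, the cascade adds one per suffix char ≠ v
theorem foldl_cascade (m : Nat) : ∀ (p : Nat) (ls : List Char) (c : Int) (v : Char),
    pvIdx ls p = v → pvIdx ls (p+1) = v → p + 2 + m ≤ ls.length →
    ((((List.range m).map (p + ·)).foldl solveStep (ls, c)).2 : Int)
      = c + ((((ls.drop (p+2)).take m).filter (fun ch => ch != v)).length : Int) := by
  induction m with
  | zero => intro p ls c v _ _ _; simp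
  | succ m ih =>
      intro p ls c v hp hp1 hlen
      have hmap : (List.range (m+1)).map (p + ·)
          = p :: (List.range m).map ((p+1) + ·) := by
        rw [List.range_succ_eq_map]
        simp only [List.map_cons, List.map_map]
        refine congrArg₂ _ (by omega) (List.map_congr_left ?_)
        intro i _; simp [Function.comp]; omega
      have hlt : p + 2 < ls.length := by omega
      have hget : pvIdx ls (p+2) = ls[p+2] := by
        simp [pvIdx, List.getD_eq_getElem?_getD, List.getElem?_eq_getElem hlt]
      have hdrop : ls.drop (p+2) = ls[p+2] :: ls.drop (p+3) :=
        List.drop_eq_getElem_cons hlt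
      rw [hmap]
      simp only [List.foldl_cons]
      have e3 : p + 1 + 2 = p + 3 := by omega
      by_cases hc : pvIdx ls (p+2) = v
      · -- next char already v: no write, no count
        have hstep : solveStep (ls, c) p = (ls, c) := by
          simp [solveStep, hp, hp1, hc]
        rw [hstep, ih (p+1) ls c v hp1 (by simpa using hc) (by omega), e3]
        have hvv : (ls[p+2] != v) = false := by
          simp [← hget, hc]
        rw [hdrop, List.take_succ_cons, List.filter_cons, hvv]
        simp
      · -- next char differs: write v there, count one
        have hstep : solveStep (ls, c) p = (ls.set (p+2) v, c + 1) := by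
          simp only [solveStep, hp, hp1]
          have : (v == pvIdx ls (p+2)) = false := by
            simp only [beq_eq_false_iff_ne, ne_eq]
            exact fun h => hc h.symm
          simp [this]
        rw [hstep]
        have h1 : pvIdx (ls.set (p+2) v) (p+1) = v := by
          simp [pvIdx, List.getD_eq_getElem?_getD, List.getElem?_set_ne (by omega : p + 2 ≠ p + 1)]
          simpa [pvIdx, List.getD_eq_getElem?_getD] using hp1
        have h2 : pvIdx (ls.set (p+2) v) (p+2) = v := by
          simp [pvIdx, List.getD_eq_getElem?_getD, hlt]
        rw [ih (p+1) (ls.set (p+2) v) (c+1) v h1 h2 (by simp; omega), e3]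
        have hd3 : (ls.set (p+2) v).drop (p+3) = ls.drop (p+3) := by
          rw [List.drop_set]
          simp
        have hvv : (ls[p+2] != v) = true := by
          simp [← hget]; exact hc
        rw [hd3, hdrop, List.take_succ_cons, List.filter_cons, hvv]
        simp only [if_true, List.length_cons]
        push_cast
        ring

-- pvFindPair characterised through pvIdx
theorem findPair_spec : ∀ (ls : List Char),
    (pvFindPair ls = none → ∀ i, i + 1 < ls.length → pvIdx ls i ≠ pvIdx ls (i+1)) ∧
    (∀ v rest, pvFindPair ls = some (v, rest) →
      ∃ p, p + 1 < ls.length ∧ pvIdx ls p = v ∧ pvIdx ls (p+1) = v ∧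
        rest = ls.drop (p+2) ∧ ∀ i, i < p → pvIdx ls i ≠ pvIdx ls (i+1))
  | [] => by
      refine ⟨fun _ i hi => ?_, fun v rest h => ?_⟩
      · simp at hi
      · simp [pvFindPair] at h
  | [a] => by
      refine ⟨fun _ i hi => ?_, fun v rest h => ?_⟩
      · simp at hi
      · simp [pvFindPair] at h
  | a :: b :: t => by
      have IH := findPair_spec (b :: t)
      refine ⟨fun hn i hi => ?_, fun v rest h => ?_⟩
      · by_cases hab : a = b
        · simp [pvFindPair, hab] at hn
        · have hn' : pvFindPair (b :: t) = none := by
            simpa [pvFindPair, hab] using hn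
          match i with
          | 0 => simpa [pvIdx] using hab
          | (j+1) =>
              have := IH.1 hn' j (by simp at hi ⊢; omega)
              simpa [pvIdx] using this
      · by_cases hab : a = b
        · simp [pvFindPair, hab] at h
          exact ⟨0, by simp, by simp [pvIdx]; exact hab.trans h.1, by simp [pvIdx]; exact h.1,
            by simp [h.2], by omega⟩
        · have h' : pvFindPair (b :: t) = some (v, rest) := by
            simpa [pvFindPair, hab] using h
          obtain ⟨p, hlen, h1, h2, h3, h4⟩ := IH.2 v rest h'
          refine ⟨p + 1, by simp at hlen ⊢; omega, by simpa [pvIdx] using h1,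
            by simpa [pvIdx] using h2, by simpa using h3, ?_⟩
          intro i hi
          match i with
          | 0 => simpa [pvIdx] using hab
          | (j+1) => simpa [pvIdx] using h4 j (by omega)

-- ===== VERDICT (by name: the statement is the Claim_ definition above) =====
theorem solve_spec : Claim_equal_solve := by
  intro ss _
  unfold Spec_solve solve solve_alt
  set ls := ss.toList with hls
  cases hf : pvFindPair ls with
  | none =>
      have hno := (findPair_spec ls).1 hf
      rw [foldl_no_pair (ls.length - 2) ls 0 (fun i hi => hno i (by omega))]
  | some vr =>
      obtain ⟨v, rest⟩ := vr
      obtain ⟨p, hlen, h1, h2, h3, h4⟩ := (findPair_spec ls).2 v rest hf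
      by_cases hp : p + 2 ≤ ls.length - 1
      · -- cascade region is nonempty
        have hsplit : ls.length - 2 = p + (ls.length - 2 - p) := by omega
        rw [hsplit, List.range_add, List.foldl_append,
          foldl_no_pair p ls 0 (fun i hi => h4 i hi)]
        have := foldl_cascade (ls.length - 2 - p) p ls 0 v h1 h2 (by omega)
        rw [this]
        have htake : (ls.drop (p+2)).take (ls.length - 2 - p) = ls.drop (p+2) := by
          apply List.take_of_length_le
          simp; omega
        rw [htake, h3]
        ring
      · -- first equal pair sits at the last two positions: loop never reaches it
        have hno : ∀ i, i < ls.length - 2 → pvIdx ls i ≠ pvIdx ls (i+1) := by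
          intro i hi; exact h4 i (by omega)
        rw [foldl_no_pair (ls.length - 2) ls 0 hno]
        have : rest = [] := by
          rw [h3]; apply List.drop_eq_nil_of_le; omega
        simp [this]
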